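-- pv_equiv track=rewrite | github.com/occia/fuzzdrivergpt | apiusage/libProjAnalyzer.py | gen_usageid
-- ===== SOURCE A (Python) =====
-- def gen_usageid(all_usage_files, all_usage_funcs, usage_file, usage_func):
-- 	all_usage_files = set(all_usage_files)
--
-- 	parts = usage_file.split('/')
-- 	shortname = None
-- 	for i in range(len(parts) - 1, 0, -1):
-- 		shortname = '/'.join(parts[i:])
-- 		count = 0
-- 		for file in all_usage_files:
-- 			if file.endswith(shortname):
-- 				count = count + 1
-- 		if count == 1:
-- 			break
--
-- 	if shortname == None:
-- 		shortname = usage_file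
--
-- 	return "%s-%s" % (shortname, usage_func)
-- ===== SOURCE B (Python) =====
-- def gen_usageid(all_usage_files, all_usage_funcs, usage_file, usage_func):
-- 	u = usage_file
-- 	parts = u.split('/')
-- 	if len(parts) > 1:
-- 		# candidate suffix lengths (shortest first): len('/'.join(parts[i:])) for i = n-1 .. 1
-- 		t = len(parts[-1])
-- 		lens = [t]
-- 		for p in reversed(parts[1:-1]):
-- 			t = t + 1 + len(p)
-- 			lens.append(t)
-- 		# common-suffix length of each distinct file with u (one pass per file)
-- 		cs = [_common_suffix_len(f, u) for f in set(all_usage_files)]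
-- 		cs.sort(reverse=True)
-- 		m1 = cs[0] if len(cs) > 0 else -1
-- 		m2 = cs[1] if len(cs) > 1 else -1
-- 		# a candidate of length L matches exactly one file iff m2 < L <= m1;
-- 		# take the shortest such, else the longest candidate
-- 		L = next((l for l in lens if m2 < l <= m1), lens[-1])
-- 		shortname = u[len(u) - L:]
-- 	else:
-- 		shortname = u
-- 	return "%s-%s" % (shortname, usage_func)
--
--
-- def _common_suffix_len(f, u):
-- 	c = 0
-- 	while c < len(f) and c < len(u) and f[len(f) - 1 - c] == u[len(u) - 1 - c]:
-- 		c = c + 1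
-- 	return c
-- ===== Notes on version B (the rewrite author's own statement) =====
-- stated objective: alternative
-- what changed: Instead of testing every candidate suffix against every file with endswith (A: O(P*N*L)), B computes once per distinct file its common-suffix length with usage_file, takes the two largest such values m1,m2, and picks the shortest candidate length L with m2 < L <= m1 in closed form (a candidate suffix matches exactly one file iff its length lies in (m2, m1]); asymptotically O(N*L + N log N + P), though a timing run read only ~1.5x on the generated inputs.
import Mathlib
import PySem

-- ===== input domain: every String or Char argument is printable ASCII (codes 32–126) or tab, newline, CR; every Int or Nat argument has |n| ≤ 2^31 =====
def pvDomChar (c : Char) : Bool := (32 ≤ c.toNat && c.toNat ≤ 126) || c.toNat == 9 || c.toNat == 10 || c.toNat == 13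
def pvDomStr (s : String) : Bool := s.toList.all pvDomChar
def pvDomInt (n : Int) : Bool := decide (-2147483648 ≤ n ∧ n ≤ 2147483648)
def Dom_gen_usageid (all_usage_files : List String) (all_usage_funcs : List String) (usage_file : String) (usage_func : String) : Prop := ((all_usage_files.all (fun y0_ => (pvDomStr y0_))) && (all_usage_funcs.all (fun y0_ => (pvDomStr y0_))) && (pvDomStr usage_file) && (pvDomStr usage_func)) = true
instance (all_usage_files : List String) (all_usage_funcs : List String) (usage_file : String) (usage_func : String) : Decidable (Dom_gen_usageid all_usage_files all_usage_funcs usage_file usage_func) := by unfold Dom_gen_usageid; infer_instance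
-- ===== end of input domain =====

-- B replaces A's per-suffix endswith scan over all files by one common-suffix-length
-- pass per distinct file plus a closed-form pick from the two largest such lengths
-- (a different algorithm; return values proved equal on all inputs).

-- ===== PORT A =====
def pvACount (files : List String) (sn : String) : Int :=
  files.foldl (fun c f => if PySem.Str.endswith f sn then c + 1 else c) 0

def pvALoop (files parts : List String) : List Int → Option String → Option String
  | [], sn => sn
  | i :: rest, _ =>
    let sn := PySem.Str.join "/" (PySem.List.slice parts (some i) none)
    if pvACount files sn == 1 then some sn else pvALoop files parts rest (some sn)

def gen_usageid (all_usage_files : List String) (all_usage_funcs : List String) (usage_file : String) (usage_func : String) : String :=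
  let files := PySem.Set.ofList all_usage_files
  -- the separator "/" is nonempty, so split? always returns some
  let parts := (PySem.Str.split? usage_file "/").getD []
  let r := pvALoop files parts (PySem.List.pyRange ((parts.length : Int) - 1) 0 (-1)) none
  (r.getD usage_file) ++ "-" ++ usage_func

-- ===== PORT B =====
-- port of _common_suffix_len: the while loop walks both strings from the end,
-- i.e. it is the matching-prefix count of the reversed character lists (exact)
def pvCsl : List Char → List Char → Int
  | a :: as, b :: bs => if a == b then 1 + pvCsl as bs else 0
  | _, _ => 0

-- cs[0] if len(cs) > 0 else -1  /  cs[1] if len(cs) > 1 else -1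
def pvHead1 : List Int → Int
  | c :: _ => c
  | [] => -1

def pvHead2 : List Int → Int
  | _ :: c :: _ => c
  | _ => -1

def gen_usageid_alt (all_usage_files : List String) (all_usage_funcs : List String) (usage_file : String) (usage_func : String) : String :=
  let u := usage_file
  let parts := (PySem.Str.split? u "/").getD []
  let shortname :=
    if 1 < parts.length then
      let t0 : Int := PySem.Str.len (PySem.List.pyGetD parts (-1) "")
      let st := ((PySem.List.slice parts (some 1) (some (-1))).reverse).foldl
        (fun (st : Int × List Int) p =>
          (st.1 + 1 + PySem.Str.len p, st.2 ++ [st.1 + 1 + PySem.Str.len p])) (t0, [t0])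
      let lens := st.2
      let cs := (PySem.Set.ofList all_usage_files).map
        (fun f => pvCsl f.toList.reverse u.toList.reverse)
      let cs' := PySem.List.sorted cs (fun x => x) true
      let m1 := pvHead1 cs'
      let m2 := pvHead2 cs'
      let L := (lens.find? (fun l => decide (m2 < l) && decide (l ≤ m1))).getD
        (PySem.List.pyGetD lens (-1) 0)
      PySem.Str.slice u (some (PySem.Str.len u - L)) none
    else u
  shortname ++ "-" ++ usage_func

-- ===== PRECONDITION & SPEC =====
def Spec_gen_usageid (all_usage_files : List String) (all_usage_funcs : List String) (usage_file : String) (usage_func : String) (out : String) : Prop := out = gen_usageid_alt all_usage_files all_usage_funcs usage_file usage_func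
instance (all_usage_files : List String) (all_usage_funcs : List String) (usage_file : String) (usage_func : String) (out : String) : Decidable (Spec_gen_usageid all_usage_files all_usage_funcs usage_file usage_func out) := by unfold Spec_gen_usageid; infer_instance

-- ===== CLAIM (what is proved, stated in full; the proofs are below) =====
def Claim_equal_gen_usageid : Prop := ∀ (all_usage_files : List String) (all_usage_funcs : List String) (usage_file : String) (usage_func : String), Dom_gen_usageid all_usage_files all_usage_funcs usage_file usage_func → Spec_gen_usageid all_usage_files all_usage_funcs usage_file usage_func (gen_usageid all_usage_files all_usage_funcs usage_file usage_func)

-- ===== LEMMAS AND PROOFS =====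

def pvSplit : List Char → List Char → List (List Char)
  | [], cur => [cur.reverse]
  | c :: rest, cur =>
    if c = '/' then cur.reverse :: pvSplit rest []
    else pvSplit rest (c :: cur)

theorem pvSplit_cons (c : Char) (rest cur : List Char) :
    pvSplit (c :: rest) cur = if c = '/' then cur.reverse :: pvSplit rest [] else pvSplit rest (c :: cur) := rfl

theorem pvSplit_ne_nil (l cur : List Char) : pvSplit l cur ≠ [] := by
  induction l generalizing cur with
  | nil => simp [pvSplit]
  | cons c rest ih =>
    simp only [pvSplit]
    split
    · simp
    · exact ih _

theorem splitOn_go_eq (fuel : Nat) (l cur : List Char) (acc : List (List Char))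
    (h : l.length < fuel) :
    PySem.Chars.splitOn.go ['/'] fuel l cur acc = acc.reverse ++ pvSplit l cur := by
  induction fuel generalizing l cur acc with
  | zero => omega
  | succ n ih =>
    rw [PySem.Chars.splitOn.go.eq_def]
    cases l with
    | nil => simp [pvSplit]
    | cons c rest =>
      simp only [List.length_cons] at h
      dsimp only
      by_cases hc : c = '/'
      · subst hc
        rw [if_pos (by simp [List.isPrefixOf])]
        rw [ih _ _ _ (by simp; omega)]
        simp only [List.length_singleton, List.drop_succ_cons, List.drop_zero, List.reverse_cons,
          List.append_assoc, List.singleton_append]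
        rw [pvSplit_cons, if_pos rfl]
      · have hpf : (['/'].isPrefixOf (c :: rest)) = false := by
          simp only [List.isPrefixOf, Bool.and_true]
          simpa [beq_iff_eq] using fun h => hc h.symm
        rw [if_neg (by rw [hpf]; exact Bool.false_ne_true)]
        rw [ih _ _ _ (by omega)]
        rw [pvSplit_cons, if_neg hc]

theorem splitOn_eq_pvSplit (l : List Char) :
    PySem.Chars.splitOn l ['/'] = pvSplit l [] := by
  have := splitOn_go_eq (l.length + 1) l [] [] (by omega)
  simpa [PySem.Chars.splitOn] using this

theorem join_pvSplit (l cur : List Char) :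
    PySem.Chars.join ['/'] (pvSplit l cur) = cur.reverse ++ l := by
  induction l generalizing cur with
  | nil => simp [pvSplit, PySem.Chars.join_singleton]
  | cons c rest ih =>
    simp only [pvSplit]
    by_cases hc : c = '/'
    · subst hc
      rw [if_pos rfl]
      rcases hr : pvSplit rest [] with _ | ⟨x, xs⟩
      · exact absurd hr (pvSplit_ne_nil _ _)
      · rw [PySem.Chars.join_cons_cons]
        have h2 := ih ([] : List Char)
        rw [hr] at h2
        simp only [List.reverse_nil, List.nil_append] at h2
        rw [h2]
        simp
    · rw [if_neg hc, ih]
      simp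

-- roundtrip: '/'.join(u.split('/')) == u
theorem join_splitOn (l : List Char) :
    PySem.Chars.join ['/'] (PySem.Chars.splitOn l ['/']) = l := by
  rw [splitOn_eq_pvSplit, join_pvSplit]
  rfl

theorem join_tail_suffix (ps : List (List Char)) :
    PySem.Chars.join ['/'] ps.tail <:+ PySem.Chars.join ['/'] ps := by
  match ps with
  | [] => simp
  | [x] => simp [PySem.Chars.join_singleton, PySem.Chars.join_nil]
  | x :: y :: t =>
    rw [PySem.Chars.join_cons_cons]
    exact List.suffix_append _ _

theorem join_drop_suffix (ps : List (List Char)) (i : Nat) :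
    PySem.Chars.join ['/'] (ps.drop i) <:+ PySem.Chars.join ['/'] ps := by
  induction i with
  | zero => simp
  | succ n ih =>
    have : ps.drop (n+1) = (ps.drop n).tail := by
      rw [← List.drop_drop]
      simp
    rw [this]
    exact (join_tail_suffix _).trans ih

theorem join_drop_decomp (ps : List (List Char)) (i : Nat) (h : i + 1 < ps.length) :
    PySem.Chars.join ['/'] (ps.drop i) = ps[i] ++ '/' :: PySem.Chars.join ['/'] (ps.drop (i + 1)) := by
  rw [List.drop_eq_getElem_cons (by omega)]
  rcases hd : ps.drop (i+1) with _ | ⟨y, t⟩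
  · have hlen := congrArg List.length hd
    simp at hlen
    omega
  · rw [PySem.Chars.join_cons_cons]
    simp

theorem pvCsl_nonneg (a b : List Char) : 0 ≤ pvCsl a b := by
  induction a generalizing b with
  | nil => simp [pvCsl]
  | cons x xs ih =>
    cases b with
    | nil => simp [pvCsl]
    | cons y ys =>
      simp only [pvCsl]
      split
      · have := ih ys; omega
      · simp

theorem prefix_iff_le_pvCsl (x a b : List Char) (hxb : x <+: b) :
    x <+: a ↔ (x.length : Int) ≤ pvCsl a b := by
  induction x generalizing a b with
  | nil => simpa using pvCsl_nonneg a b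
  | cons c x' ih =>
    rcases hxb with ⟨t, ht⟩
    cases a with
    | nil =>
      constructor
      · intro h; exact absurd h (by simp)
      · intro h; simp only [pvCsl, List.length_cons] at h; push_cast at h; omega
    | cons d a' =>
      subst ht
      simp only [pvCsl, List.cons_append]
      by_cases hdc : d = c
      · subst hdc
        rw [if_pos (by simp)]
        have hiff := ih a' (x' ++ t) (List.prefix_append _ _)
        constructor
        · intro h
          have h' := (List.cons_prefix_cons.mp h).2
          have := hiff.mp h'
          simp only [List.length_cons]
          push_cast
          omega
        · intro h
          simp only [List.length_cons] at h
          push_cast at h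
          have hx : (x'.length : Int) ≤ pvCsl a' (x' ++ t) := by omega
          exact List.cons_prefix_cons.mpr ⟨rfl, hiff.mpr hx⟩
      · rw [if_neg (by simpa using fun h => hdc h)]
        constructor
        · intro h
          exact absurd (List.cons_prefix_cons.mp h).1.symm hdc
        · intro h
          simp only [List.length_cons] at h
          push_cast at h
          omega

theorem endswith_iff_csl (f s u : List Char) (hsu : s <:+ u) :
    PySem.Chars.endswith f s = decide ((s.length : Int) ≤ pvCsl f.reverse u.reverse) := by
  have h1 : PySem.Chars.endswith f s = true ↔ s <:+ f := PySem.Chars.endswith_iff f s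
  have h2 : s <:+ f ↔ s.reverse <+: f.reverse := List.reverse_prefix.symm
  have h3 : s.reverse <+: u.reverse := List.reverse_prefix.mpr hsu
  have h4 := prefix_iff_le_pvCsl s.reverse f.reverse u.reverse h3
  rcases hb : PySem.Chars.endswith f s with _ | _
  · symm
    simp only [decide_eq_false_iff_not]
    intro hle
    have : s <:+ f := h2.mpr (h4.mpr (by simpa using hle))
    rw [← h1] at this
    simp [hb] at this
  · symm
    simp only [decide_eq_true_eq]
    have := h4.mp (h2.mp (h1.mp hb))
    simpa using this

theorem countP_eq_one_iff (ws : List Int) (hdesc : ws.Pairwise (fun a b => b ≤ a))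
    (hnn : ∀ w ∈ ws, 0 ≤ w) (ℓ : Int) (hl : 0 ≤ ℓ) :
    (ws.countP (fun c => decide (ℓ ≤ c)) = 1) ↔ (pvHead2 ws < ℓ ∧ ℓ ≤ pvHead1 ws) := by
  match ws with
  | [] =>
    simp only [List.countP_nil, pvHead1, pvHead2]
    constructor
    · intro h; omega
    · rintro ⟨h1, h2⟩; omega
  | [c0] =>
    simp only [List.countP_cons, List.countP_nil, pvHead1, pvHead2]
    by_cases h : ℓ ≤ c0 <;> (simp [h] <;> omega)
  | c0 :: c1 :: t =>
    simp only [List.pairwise_cons] at hdesc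
    have hc10 : c1 ≤ c0 := hdesc.1 c1 (by simp)
    have ht1 : ∀ x ∈ t, x ≤ c1 := fun x hx => hdesc.2.1 x hx
    simp only [List.countP_cons, pvHead1, pvHead2]
    by_cases h1 : ℓ ≤ c1
    · have h0 : ℓ ≤ c0 := le_trans h1 hc10
      have hge : 0 ≤ t.countP (fun c => decide (ℓ ≤ c)) := Nat.zero_le _
      simp [h0, h1]
    · have hz : t.countP (fun c => decide (ℓ ≤ c)) = 0 := by
        rw [List.countP_eq_zero]
        intro x hx
        simp only [decide_eq_true_eq]
        exact fun hc => h1 (le_trans hc (ht1 x hx) : ℓ ≤ c1)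
      by_cases h0 : ℓ ≤ c0 <;> (simp [h0, h1, hz] <;> omega)

theorem find?_congr' {α : Type} (xs : List α) (p q : α → Bool)
    (h : ∀ x ∈ xs, p x = q x) : xs.find? p = xs.find? q := by
  induction xs with
  | nil => rfl
  | cons x t ih =>
    simp only [List.find?_cons]
    rw [h x (by simp)]
    rcases hq : q x with _|_
    · simp only
      exact ih fun y hy => h y (by simp [hy])
    · simp

theorem pvALoop_char (files parts : List String) (is : List Int) (sn : Option String) :
    pvALoop files parts is sn =
      match is.find? (fun i => pvACount files (PySem.Str.join "/" (PySem.List.slice parts (some i) none)) == 1) with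
      | some i => some (PySem.Str.join "/" (PySem.List.slice parts (some i) none))
      | none =>
        match is.getLast? with
        | some i => some (PySem.Str.join "/" (PySem.List.slice parts (some i) none))
        | none => sn := by
  induction is generalizing sn with
  | nil => rfl
  | cons i rest ih =>
    rcases hc : (pvACount files (PySem.Str.join "/" (PySem.List.slice parts (some i) none)) == 1) with _|_
    · rw [show pvALoop files parts (i :: rest) sn
          = pvALoop files parts rest (some (PySem.Str.join "/" (PySem.List.slice parts (some i) none))) by
        simp only [pvALoop]; rw [if_neg (by simp [hc])]]
      rw [ih]
      rw [List.find?_cons_of_neg (by simp [hc])]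
      rcases hf : rest.find? (fun i => pvACount files (PySem.Str.join "/" (PySem.List.slice parts (some i) none)) == 1) with _|j
      · cases rest with
        | nil => simp
        | cons r t =>
          simp only [List.getLast?_cons_cons]
          obtain ⟨y, hy⟩ := Option.isSome_iff_exists.mp
            (List.getLast?_isSome.mpr (by simp) : ((r :: t).getLast?).isSome)
          rw [hy]
      · rfl
    · rw [show pvALoop files parts (i :: rest) sn
          = some (PySem.Str.join "/" (PySem.List.slice parts (some i) none)) by
        simp only [pvALoop]; rw [if_pos (by simp_all)]]
      rw [List.find?_cons_of_pos (by simp [hc])]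

theorem foldl_append_scanl (g : Int → String → Int) (qs : List String) (t0 : Int) (A : List Int) :
    qs.foldl (fun (st : Int × List Int) p => (g st.1 p, st.2 ++ [g st.1 p])) (t0, A) =
      ((List.scanl g t0 qs).getLast (by cases qs <;> simp [List.scanl]),
       A ++ (List.scanl g t0 qs).tail) := by
  induction qs generalizing t0 A with
  | nil => simp [List.scanl]
  | cons p qs ih =>
    simp only [List.foldl_cons, List.scanl_cons]
    rw [ih]
    congr 1
    · rw [List.getLast_cons (by cases qs <;> simp [List.scanl])]
    · rcases hs : List.scanl g (g t0 p) qs with _|⟨z,zs⟩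
      · exact absurd hs (by cases qs <;> simp [List.scanl])
      · have hz : z = g t0 p := by
          cases qs <;> simp [List.scanl] at hs <;> omega
        simp [hz]


def pvL (P : List (List Char)) (i : Nat) : Int := ((PySem.Chars.join ['/'] (P.drop i)).length : Int)

theorem pvL_nonneg (P : List (List Char)) (i : Nat) : 0 ≤ pvL P i := by
  simp [pvL]

theorem slice_one_negone {α : Type} (xs : List α) :
    PySem.List.slice xs (some 1) (some (-1)) = (xs.drop 1).dropLast := by
  cases xs with
  | nil => rfl
  | cons x t =>
    show List.take _ (List.drop _ _) = _
    norm_num [PySem.List.clampIdx]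
    rw [if_neg (by omega), List.dropLast_eq_take]

theorem scanl_take (parts : List String) (j : Nat) (hj : j + 2 ≤ parts.length) :
    List.scanl (fun t p => t + 1 + PySem.Str.len p) (pvL (parts.map String.toList) (j + 1))
        ((((parts.drop 1).dropLast).take j).reverse)
      = (PySem.List.pyRange ((j : Int) + 1) 0 (-1)).map (fun i => pvL (parts.map String.toList) i.toNat) := by
  induction j with
  | zero =>
    rw [PySem.List.pyRange_neg_one_cons (by omega), PySem.List.pyRange_neg_one_eq_nil (by omega)]
    simp [List.scanl]
  | succ j ih =>
    have hj' : j + 2 ≤ parts.length := by omega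
    have hjlt : j < ((parts.drop 1).dropLast).length := by
      simp only [List.length_dropLast, List.length_drop]
      omega
    rw [List.take_add_one, List.getElem?_eq_getElem hjlt]
    simp only [Option.toList_some, List.reverse_append, List.reverse_cons, List.reverse_nil,
      List.nil_append, List.singleton_append, List.scanl_cons]
    have hmid : ((parts.drop 1).dropLast)[j] = parts[j+1]'(by omega) := by
      rw [List.getElem_dropLast, List.getElem_drop]
      congr 1
      omega
    have hstep : pvL (parts.map String.toList) (j + 2) + 1 + PySem.Str.len (((parts.drop 1).dropLast)[j])
        = pvL (parts.map String.toList) (j + 1) := by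
      rw [hmid]
      have hdec := join_drop_decomp (parts.map String.toList) (j+1) (by simp; omega)
      simp only [pvL, hdec]
      rw [PySem.Str.len_eq]
      have : (parts.map String.toList)[j+1]'(by simp; omega) = (parts[j+1]'(by omega)).toList := by
        simp
      rw [this]
      simp
      ring
    rw [hstep, ih hj']
    have hcast : ((j:Int) + 1 + 1) = (((j+1):Nat) : Int) + 1 := by push_cast; ring_nf
    rw [show PySem.List.pyRange (((j+1):Nat) + 1 : Int) 0 (-1)
        = ((j:Int)+1+1) :: PySem.List.pyRange ((j:Int)+1) 0 (-1) by
      rw [← hcast, PySem.List.pyRange_neg_one_cons (by omega)]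
      norm_num]
    simp only [List.map_cons]
    congr 2

theorem slice_of_suffix (u : String) (S : List Char) (hsu : S <:+ u.toList) :
    (PySem.Str.slice u (some (PySem.Str.len u - (S.length : Int))) none).toList = S := by
  rcases hsu with ⟨pre, hpre⟩
  rw [PySem.Str.toList_slice, PySem.Chars.slice_eq_listSlice]
  have hlen : u.toList.length = pre.length + S.length := by
    rw [← hpre]; simp
  rw [PySem.Str.len_eq]
  have h0 : (0:Int) ≤ (u.toList.length : Int) - S.length := by omega
  rw [PySem.List.slice_from _ h0]
  have : ((u.toList.length : Int) - (S.length : Int)).toNat = pre.length := by omega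
  rw [this, ← hpre, List.drop_left]

theorem pyRange_neg_getLast (a : Int) (h : 1 ≤ a) :
    (PySem.List.pyRange a 0 (-1)).getLast? = some 1 := by
  rw [PySem.List.pyRange_neg_one_eq_reverse]
  rw [List.getLast?_reverse]
  rw [PySem.List.pyRange_one_cons (by omega)]
  rfl

-- the common count characterisation: A's per-suffix count is 1 iff the suffix length lies in (m2, m1]
theorem pred_eq (files : List String) (parts : List String) (u : String)
    (hjoin : PySem.Chars.join ['/'] (parts.map String.toList) = u.toList)
    (i : Int) (hi : 0 ≤ i) :
    (pvACount files (PySem.Str.join "/" (PySem.List.slice parts (some i) none)) == 1)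
      = (decide (pvHead2 (PySem.List.sorted (files.map (fun f => pvCsl f.toList.reverse u.toList.reverse)) (fun x => x) true)
            < pvL (parts.map String.toList) i.toNat)
         && decide (pvL (parts.map String.toList) i.toNat
            ≤ pvHead1 (PySem.List.sorted (files.map (fun f => pvCsl f.toList.reverse u.toList.reverse)) (fun x => x) true))) := by
  set P := parts.map String.toList with hPdef
  set ℓ := pvL P i.toNat with hldef
  set cs := files.map (fun f => pvCsl f.toList.reverse u.toList.reverse) with hcs
  set cs' := PySem.List.sorted cs (fun x => x) true with hcs'
  have hS : (PySem.Str.join "/" (PySem.List.slice parts (some i) none)).toList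
      = PySem.Chars.join ['/'] (P.drop i.toNat) := by
    rw [PySem.Str.toList_join, PySem.List.slice_from _ hi]
    rw [List.map_drop]
    rfl
  have hsu : PySem.Chars.join ['/'] (P.drop i.toNat) <:+ u.toList := by
    rw [← hjoin]
    exact join_drop_suffix P i.toNat
  have hcnt : pvACount files (PySem.Str.join "/" (PySem.List.slice parts (some i) none))
      = ((files.countP (fun f => PySem.Str.endswith f (PySem.Str.join "/" (PySem.List.slice parts (some i) none)))) : Int) := by
    unfold pvACount
    rw [PySem.List.foldl_count_if]
    simp
  have he : ∀ f : String, PySem.Str.endswith f (PySem.Str.join "/" (PySem.List.slice parts (some i) none))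
      = decide (ℓ ≤ pvCsl f.toList.reverse u.toList.reverse) := by
    intro f
    rw [PySem.Str.endswith_eq, hS, endswith_iff_csl _ _ _ hsu]
    rfl
  have hc1 : files.countP (fun f => PySem.Str.endswith f (PySem.Str.join "/" (PySem.List.slice parts (some i) none)))
      = cs'.countP (fun c => decide (ℓ ≤ c)) := by
    rw [List.countP_congr (fun f _ => by rw [he f])]
    refine Eq.trans ?_ ((List.Perm.countP_eq _ (PySem.List.sorted_perm cs (fun x => x) true)).symm)
    exact (List.countP_map (p := fun c => decide (ℓ ≤ c))
      (f := fun f : String => pvCsl f.toList.reverse u.toList.reverse) (l := files)).symm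
  have hnn : ∀ w ∈ cs', 0 ≤ w := by
    intro w hw
    have : w ∈ cs := (PySem.List.sorted_perm cs (fun x => x) true).mem_iff.mp hw
    rw [hcs] at this
    rcases List.mem_map.mp this with ⟨f, _, rfl⟩
    exact pvCsl_nonneg _ _
  have hdesc : cs'.Pairwise (fun a b => b ≤ a) := PySem.List.sorted_pairwise_rev cs (fun x => x)
  have H := countP_eq_one_iff cs' hdesc hnn ℓ (pvL_nonneg P i.toNat)
  rw [Bool.eq_iff_iff]
  simp only [beq_iff_eq, Bool.and_eq_true, decide_eq_true_eq, hcnt, hc1]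
  constructor
  · intro h
    exact H.mp (by exact_mod_cast h)
  · intro h
    exact_mod_cast H.mpr h

-- ===== VERDICT (by name: the statement is the Claim_ definition above) =====
theorem gen_usageid_spec : Claim_equal_gen_usageid := by
  unfold Claim_equal_gen_usageid
  intro afs afn u fn _
  unfold Spec_gen_usageid
  have hsplit : PySem.Str.split? u "/" = some ((PySem.Chars.splitOn u.toList ['/']).map String.ofList) := by
    simp [PySem.Str.split?, PySem.Chars.split?]
  simp only [gen_usageid, gen_usageid_alt, hsplit, Option.getD_some]
  set files := PySem.Set.ofList afs with hfiles
  set parts := (PySem.Chars.splitOn u.toList ['/']).map String.ofList with hparts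
  have hP : parts.map String.toList = PySem.Chars.splitOn u.toList ['/'] := by
    rw [hparts, List.map_map]
    simp [Function.comp_def]
  have hjoin : PySem.Chars.join ['/'] (parts.map String.toList) = u.toList := by
    rw [hP, join_splitOn]
  by_cases hn : 1 < parts.length
  · rw [if_pos hn]
    have hne : parts ≠ [] := by intro h; rw [h] at hn; simp at hn
    have hPne : parts.map String.toList ≠ [] := by simpa using hne
    rw [pvALoop_char, slice_one_negone, foldl_append_scanl (fun t p => t + 1 + PySem.Str.len p)]
    have hcons : ∀ (g : Int → String → Int) (t0 : Int) (qs : List String),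
        [t0] ++ (List.scanl g t0 qs).tail = List.scanl g t0 qs := by
      intro g t0 qs; cases qs <;> simp [List.scanl_cons]
    rw [hcons]
    have ht0 : PySem.Str.len (PySem.List.pyGetD parts (-1) "") = pvL (parts.map String.toList) (parts.length - 1) := by
      rw [PySem.List.pyGetD_neg_one parts "" hne, PySem.Str.len_eq]
      unfold pvL
      rw [show parts.length - 1 = (parts.map String.toList).length - 1 from by simp]
      rw [List.drop_length_sub_one hPne, PySem.Chars.join_singleton, List.getLast_map hPne]
    simp only [ht0]
    have hscan := scanl_take parts (parts.length - 2) (by omega)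
    rw [List.take_of_length_le (by simp; omega)] at hscan
    rw [show parts.length - 2 + 1 = parts.length - 1 from by omega] at hscan
    rw [show (((parts.length - 2 : Nat)) : Int) + 1 = (parts.length : Int) - 1 from by omega] at hscan
    rw [hscan]
    rw [List.find?_map]
    have hfc : (PySem.List.pyRange ((parts.length : Int) - 1) 0 (-1)).find?
          ((fun l => decide (pvHead2 (PySem.List.sorted (files.map (fun f => pvCsl f.toList.reverse u.toList.reverse)) (fun x => x) true) < l)
              && decide (l ≤ pvHead1 (PySem.List.sorted (files.map (fun f => pvCsl f.toList.reverse u.toList.reverse)) (fun x => x) true)))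
            ∘ (fun i => pvL (parts.map String.toList) i.toNat))
        = (PySem.List.pyRange ((parts.length : Int) - 1) 0 (-1)).find?
            (fun i => pvACount files (PySem.Str.join "/" (PySem.List.slice parts (some i) none)) == 1) := by
      apply find?_congr'
      intro i hi
      have := PySem.List.mem_pyRange_neg_one.mp hi
      exact (pred_eq files parts u hjoin i (by omega)).symm
    rw [hfc]
    have hshort : ∀ i : Int, 0 ≤ i →
        PySem.Str.slice u (some (PySem.Str.len u - pvL (parts.map String.toList) i.toNat)) none
          = PySem.Str.join "/" (PySem.List.slice parts (some i) none) := by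
      intro i hi
      have hS : (PySem.Str.join "/" (PySem.List.slice parts (some i) none)).toList
          = PySem.Chars.join ['/'] ((parts.map String.toList).drop i.toNat) := by
        rw [PySem.Str.toList_join, PySem.List.slice_from _ hi, List.map_drop]
        rfl
      have hsu : PySem.Chars.join ['/'] ((parts.map String.toList).drop i.toNat) <:+ u.toList := by
        rw [← hjoin]
        exact join_drop_suffix _ i.toNat
      rw [← String.toList_inj, hS]
      exact slice_of_suffix u _ hsu
    rcases hfind : (PySem.List.pyRange ((parts.length : Int) - 1) 0 (-1)).find?
        (fun i => pvACount files (PySem.Str.join "/" (PySem.List.slice parts (some i) none)) == 1) with _ | i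
    · rw [pyRange_neg_getLast ((parts.length : Int) - 1) (by omega)]
      have hidxne : PySem.List.pyRange ((parts.length : Int) - 1) 0 (-1) ≠ [] := by
        intro h
        have h2 := pyRange_neg_getLast ((parts.length : Int) - 1) (by omega)
        rw [h] at h2
        simp at h2
      have hlne : (PySem.List.pyRange ((parts.length : Int) - 1) 0 (-1)).map (fun i => pvL (parts.map String.toList) i.toNat) ≠ [] := by
        simpa using hidxne
      rw [PySem.List.pyGetD_neg_one _ 0 hlne]
      have hgl : ((PySem.List.pyRange ((parts.length : Int) - 1) 0 (-1)).map (fun i => pvL (parts.map String.toList) i.toNat)).getLast hlne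
          = pvL (parts.map String.toList) (1 : Int).toNat := by
        have h1 := List.getLast?_map (f := fun i : Int => pvL (parts.map String.toList) i.toNat) (l := PySem.List.pyRange ((parts.length : Int) - 1) 0 (-1))
        rw [pyRange_neg_getLast ((parts.length : Int) - 1) (by omega)] at h1
        rw [List.getLast?_eq_some_getLast hlne] at h1
        simpa using h1
      rw [hgl]
      simp only [Option.map_none, Option.getD_none]
      rw [hshort 1 (by omega)]
      rfl
    · have hmem := List.mem_of_find?_eq_some hfind
      have hi : 0 ≤ i := by
        have := PySem.List.mem_pyRange_neg_one.mp hmem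
        omega
      simp only [Option.map_some, Option.getD_some]
      rw [hshort i hi]
  · rw [if_neg hn]
    have hidx : PySem.List.pyRange ((parts.length : Int) - 1) 0 (-1) = [] :=
      PySem.List.pyRange_neg_one_eq_nil (by omega)
    rw [hidx]
    rfl
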